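-- pv_equiv track=rewrite | github.com/netzkolchose/django-computedfields | computedfields/helper.py | skip_equal_segments
-- ===== SOURCE A (Python) =====
-- from itertools import tee, zip_longest
-- from typing import Any, Iterator, List, Sequence, Type, TypeVar, Tuple, Union, Generator, Iterable
--
-- def skip_equal_segments(ps: Sequence[str], rs: Sequence[str]) -> List[str]:
--     """
--     Skips all equal segments from the beginning of `ps` and `rs`
--     returning left over segments from `ps`.
--     """
--     add: bool = False
--     ret: List[str] = []
--     for left, right in zip_longest(ps, rs):
--         if left is None:
--             break
--         if left != right:
--             add = True
--         if add:
--             ret.append(left)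
--     return ret
-- ===== SOURCE B (Python) =====
-- def skip_equal_segments(ps, rs):
--     """
--     Skips all equal segments from the beginning of `ps` and `rs`
--     returning left over segments from `ps`.
--     """
--     n = 0
--     for left, right in zip(ps, rs):
--         if left != right:
--             break
--         n += 1
--     return list(ps[n:])
-- ===== Notes on version B (the rewrite author's own statement) =====
-- stated objective: simpler
-- what changed: Replaces the latch-flag-and-append loop over zip_longest by computing the common-prefix length with zip and returning a single slice ps[n:].
import Mathlib
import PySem

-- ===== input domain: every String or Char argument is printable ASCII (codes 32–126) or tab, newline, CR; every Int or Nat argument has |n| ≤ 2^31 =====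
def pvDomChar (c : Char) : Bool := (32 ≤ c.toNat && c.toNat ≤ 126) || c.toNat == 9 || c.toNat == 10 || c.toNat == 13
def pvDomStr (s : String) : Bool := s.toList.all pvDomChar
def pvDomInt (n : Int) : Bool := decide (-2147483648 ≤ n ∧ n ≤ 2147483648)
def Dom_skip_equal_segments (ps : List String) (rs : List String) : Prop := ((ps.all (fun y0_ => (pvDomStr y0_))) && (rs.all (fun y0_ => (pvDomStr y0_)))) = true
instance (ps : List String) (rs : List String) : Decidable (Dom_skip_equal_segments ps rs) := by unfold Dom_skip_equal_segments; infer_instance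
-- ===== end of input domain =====

-- B replaces A's latch-flag-and-append loop by computing the common-prefix length and slicing once (objective: simpler).

-- ===== PORT A =====
-- A's loop over zip_longest(ps, rs) with the `add` latch; `left is None` (ps exhausted) breaks,
-- `right is None` (rs exhausted) makes `left != right` true. Transliterated as structural recursion
-- over ps with rs consumed alongside and the latch `add` threaded through.
def pvALoop (ps : List String) (rs : List String) (add : Bool) : List String :=
  match ps, rs with
  | [], _ => []                                   -- left is None: break
  | l :: ps', [] =>                               -- right is None: l != None, so add := True
      l :: pvALoop ps' [] true
  | l :: ps', r :: rs' =>
      let add' := if l ≠ r then true else add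
      if add' then l :: pvALoop ps' rs' add' else pvALoop ps' rs' add'

def skip_equal_segments (ps : List String) (rs : List String) : List String :=
  pvALoop ps rs false

-- ===== PORT B =====
-- B: count equal leading pairs of zip(ps, rs), breaking at the first inequality, then slice ps[n:].
def pvPrefixLen (ps : List String) (rs : List String) : Nat :=
  match ps, rs with
  | l :: ps', r :: rs' => if l ≠ r then 0 else pvPrefixLen ps' rs' + 1
  | _, _ => 0

def skip_equal_segments_alt (ps : List String) (rs : List String) : List String :=
  ps.drop (pvPrefixLen ps rs)   -- ps[n:] with 0 ≤ n ≤ len ps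

-- ===== PRECONDITION & SPEC =====
def Spec_skip_equal_segments (ps : List String) (rs : List String) (out : List String) : Prop := out = skip_equal_segments_alt ps rs
instance (ps : List String) (rs : List String) (out : List String) : Decidable (Spec_skip_equal_segments ps rs out) := by unfold Spec_skip_equal_segments; infer_instance

-- ===== CLAIM (what is proved, stated in full; the proofs are below) =====
def Claim_equal_skip_equal_segments : Prop := ∀ (ps : List String) (rs : List String), Dom_skip_equal_segments ps rs → Spec_skip_equal_segments ps rs (skip_equal_segments ps rs)

-- ===== LEMMAS AND PROOFS =====

-- Once the latch is set, A appends every remaining element of ps.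
lemma pvALoop_true (ps : List String) (rs : List String) : pvALoop ps rs true = ps := by
  induction ps generalizing rs with
  | nil => simp [pvALoop]
  | cons l ps' ih =>
    cases rs with
    | nil => simp [pvALoop, ih]
    | cons r rs' =>
      by_cases h : l = r <;> simp [pvALoop, h, ih]

lemma pvALoop_false (ps : List String) (rs : List String) :
    pvALoop ps rs false = ps.drop (pvPrefixLen ps rs) := by
  induction ps generalizing rs with
  | nil => simp [pvALoop, pvPrefixLen]
  | cons l ps' ih =>
    cases rs with
    | nil => simp [pvALoop, pvPrefixLen, pvALoop_true]
    | cons r rs' =>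
      by_cases h : l = r
      · simp [pvALoop, pvPrefixLen, h, ih]
      · simp [pvALoop, pvPrefixLen, h, pvALoop_true]

-- ===== VERDICT (by name: the statement is the Claim_ definition above) =====
theorem skip_equal_segments_spec : Claim_equal_skip_equal_segments := by
  intro ps rs _
  unfold Spec_skip_equal_segments skip_equal_segments skip_equal_segments_alt
  exact pvALoop_false ps rs
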